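-- pv_equiv track=rewrite | github.com/danhepai/CS-UBB | Year01/FP/Pregatire Examen/divide_et_impera.py | evenIndexedProduct
-- ===== SOURCE A (Python) =====
-- def evenIndexedProduct(nums, left, right):
--     if len(nums) == 0:
--         raise ValueError("Empty list")
--
--     if left == right:
--         if left % 2 == 0:
--             return nums[left]
--         else:
--             return 1
--
--
--     middle = (left + right) // 2
--     left_side = evenIndexedProduct(nums, left, middle)
--     right_side = evenIndexedProduct(nums, middle + 1, right)
--     return left_side * right_side
-- ===== SOURCE B (Python) =====
-- def evenIndexedProduct(nums, left, right):
--     if len(nums) == 0: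
--         raise ValueError("Empty list")
--     product = 1
--     for i in range(left, right + 1):
--         if i % 2 == 0:
--             product *= nums[i]
--     return product
-- ===== Notes on version B (the rewrite author's own statement) =====
-- stated objective: simpler
-- what changed: Replaces the divide-and-conquer recursion by a single flat loop over range(left, right+1) that multiplies the even-indexed elements into an accumulator.
import Mathlib
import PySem

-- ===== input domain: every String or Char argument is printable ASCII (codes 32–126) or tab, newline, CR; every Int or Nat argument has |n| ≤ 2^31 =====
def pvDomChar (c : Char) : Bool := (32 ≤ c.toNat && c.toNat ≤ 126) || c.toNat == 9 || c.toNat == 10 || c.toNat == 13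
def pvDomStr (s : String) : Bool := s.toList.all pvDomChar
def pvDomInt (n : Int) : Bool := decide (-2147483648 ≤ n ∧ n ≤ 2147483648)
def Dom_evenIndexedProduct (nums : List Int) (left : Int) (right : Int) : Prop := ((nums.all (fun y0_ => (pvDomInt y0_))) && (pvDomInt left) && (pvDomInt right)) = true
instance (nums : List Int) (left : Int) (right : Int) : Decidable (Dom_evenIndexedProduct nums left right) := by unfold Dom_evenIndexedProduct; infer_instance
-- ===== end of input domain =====

-- B replaces A's divide-and-conquer recursion by one flat accumulating loop (simpler decomposition, same cost).

-- ===== PORT A =====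
-- Literal port of A's recursion; the `left < right` test only makes the recursion total
-- (Python recurses forever / RecursionError when left > right; excluded by Pre_).
def evenIndexedProduct (nums : List Int) (left : Int) (right : Int) : Int :=
  if nums.length = 0 then 0    -- Python: raise ValueError (excluded by Pre_)
  else if left = right then
    if PySem.Int.mod left 2 = 0 then (PySem.List.pyGet? nums left).getD 0 else 1
  else if _h : left < right then
    let middle := PySem.Int.floordiv (left + right) 2
    let left_side := evenIndexedProduct nums left middle
    let right_side := evenIndexedProduct nums (middle + 1) right
    left_side * right_side
  else 0    -- Python: RecursionError (excluded by Pre_)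
termination_by (right - left).toNat
decreasing_by
  · have := PySem.Int.floordiv_two_mid_bounds (lo := left) (hi := right) (le_of_lt _h)
    have hlt : PySem.Int.floordiv (left + right) 2 < right := by
      rw [PySem.Int.floordiv_lt_iff_lt_mul (by omega)]; omega
    omega
  · have := PySem.Int.floordiv_two_mid_bounds (lo := left) (hi := right) (le_of_lt _h)
    omega

-- ===== PORT B =====
def evenIndexedProduct_alt (nums : List Int) (left : Int) (right : Int) : Int :=
  if nums.length = 0 then 0    -- Python: raise ValueError (excluded by Pre_)
  else
    (PySem.List.pyRange left (right + 1) 1).foldl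
      (fun product i =>
        if PySem.Int.mod i 2 = 0 then product * (PySem.List.pyGet? nums i).getD 0 else product)
      1

-- ===== PRECONDITION & SPEC =====
-- Pre_ = inputs where Python A returns: non-empty list (else ValueError), left ≤ right (else
-- unbounded recursion / RecursionError), and, when the range contains an even index, its first
-- and last even indices are valid Python indices (possibly negative; else IndexError).
def Pre_evenIndexedProduct (nums : List Int) (left : Int) (right : Int) : Prop :=
  nums ≠ [] ∧ left ≤ right ∧
  ((if PySem.Int.mod left 2 = 0 then left else left + 1) ≤
     (if PySem.Int.mod right 2 = 0 then right else right - 1) →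
   -(nums.length : Int) ≤ (if PySem.Int.mod left 2 = 0 then left else left + 1) ∧
     (if PySem.Int.mod right 2 = 0 then right else right - 1) < (nums.length : Int))
instance (nums : List Int) (left : Int) (right : Int) : Decidable (Pre_evenIndexedProduct nums left right) := by unfold Pre_evenIndexedProduct; infer_instance

def pvWitness_evenIndexedProduct : List Int × Int × Int := ([3, 5, 7, 2], 0, 3)

def Spec_evenIndexedProduct (nums : List Int) (left : Int) (right : Int) (out : Int) : Prop := out = evenIndexedProduct_alt nums left right
instance (nums : List Int) (left : Int) (right : Int) (out : Int) : Decidable (Spec_evenIndexedProduct nums left right out) := by unfold Spec_evenIndexedProduct; infer_instance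

-- ===== CLAIM (what is proved, stated in full; the proofs are below) =====
def Claim_equal_evenIndexedProduct : Prop := ∀ (nums : List Int) (left : Int) (right : Int), Dom_evenIndexedProduct nums left right → Pre_evenIndexedProduct nums left right → Spec_evenIndexedProduct nums left right (evenIndexedProduct nums left right)

-- ===== LEMMAS AND PROOFS =====

-- B's loop step, named for the proofs below.
def pvStep (nums : List Int) (product i : Int) : Int :=
  if PySem.Int.mod i 2 = 0 then product * (PySem.List.pyGet? nums i).getD 0 else product

lemma pvStep_factor (nums : List Int) (xs : List Int) :
    ∀ a : Int, xs.foldl (pvStep nums) a = a * xs.foldl (pvStep nums) 1 := by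
  induction xs with
  | nil => intro a; simp
  | cons x xs ih =>
    intro a
    simp only [List.foldl_cons]
    rw [ih (pvStep nums a x), ih (pvStep nums 1 x)]
    unfold pvStep
    split_ifs <;> ring

lemma evenIndexedProduct_eq_fold (nums : List Int) (hne : nums.length ≠ 0) :
    ∀ n (l r : Int), (r - l).toNat = n → l ≤ r →
      evenIndexedProduct nums l r =
        (PySem.List.pyRange l (r + 1) 1).foldl (pvStep nums) 1 := by
  intro n
  induction n using Nat.strong_induction_on with
  | _ n ih =>
    intro l r hn hlr
    rw [evenIndexedProduct]
    by_cases heq : l = r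
    · subst heq
      rw [PySem.List.pyRange_one_singleton]
      simp [hne, pvStep]
    · have hlt : l < r := lt_of_le_of_ne hlr heq
      have hmid := PySem.Int.floordiv_two_mid_bounds (lo := l) (hi := r) hlr
      set m := PySem.Int.floordiv (l + r) 2 with hm
      have hmr : m < r := by
        rw [hm, PySem.Int.floordiv_lt_iff_lt_mul (by omega)]; omega
      have h1 : evenIndexedProduct nums l m =
          (PySem.List.pyRange l (m + 1) 1).foldl (pvStep nums) 1 :=
        ih (m - l).toNat (by omega) l m rfl (by omega)
      have h2 : evenIndexedProduct nums (m + 1) r =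
          (PySem.List.pyRange (m + 1) (r + 1) 1).foldl (pvStep nums) 1 :=
        ih (r - (m + 1)).toNat (by omega) (m + 1) r rfl (by omega)
      simp only [hne, if_false, heq, hlt, dif_pos]
      rw [PySem.List.pyRange_one_append l (m + 1) (r + 1) (by omega) (by omega),
        List.foldl_append]
      show evenIndexedProduct nums l m * evenIndexedProduct nums (m + 1) r = _
      rw [h1, h2,
        pvStep_factor nums (PySem.List.pyRange (m + 1) (r + 1) 1)
          (List.foldl (pvStep nums) 1 (PySem.List.pyRange l (m + 1) 1))]

-- ===== VERDICT (by name: the statement is the Claim_ definition above) =====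
theorem evenIndexedProduct_spec : Claim_equal_evenIndexedProduct := by
  intro nums left right _ hpre
  obtain ⟨hne, hlr, -⟩ := hpre
  have hlen : nums.length ≠ 0 := by simpa using hne
  unfold Spec_evenIndexedProduct evenIndexedProduct_alt
  rw [if_neg hlen]
  exact evenIndexedProduct_eq_fold nums hlen _ left right rfl hlr
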